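-- pv_equiv track=rewrite | github.com/Tharun135/doc-scanner | app/rules/document_structure.py | check_spacing_consistency
-- ===== SOURCE A (Python) =====
-- def check_spacing_consistency(text_content):
--     """Check for consistent spacing patterns."""
--     suggestions = []
--
--     lines = text_content.split('\n')
--
--     # Check for inconsistent indentation
--     indentation_patterns = set()
--     for line in lines:
--         if line.strip():  # Non-empty line
--             leading_spaces = len(line) - len(line.lstrip())
--             if leading_spaces > 0:
--                 indentation_patterns.add(leading_spaces)
--
--     # If there are many different indentation levels, suggest consistency
--     if len(indentation_patterns) > 4:
--         suggestions.append("Inconsistent indentation patterns. Consider using consistent spacing (e.g., 2 or 4 spaces).")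
--
--     # Check for multiple consecutive blank lines
--     blank_line_count = 0
--     max_consecutive_blanks = 0
--
--     for line in lines:
--         if not line.strip():
--             blank_line_count += 1
--             max_consecutive_blanks = max(max_consecutive_blanks, blank_line_count)
--         else:
--             blank_line_count = 0
--
--     if max_consecutive_blanks > 2:
--         suggestions.append(f"Excessive blank lines: Found {max_consecutive_blanks} consecutive blank lines. Consider using single blank lines for separation.")
--
--     return suggestions
-- ===== SOURCE B (Python) =====
-- def check_spacing_consistency(text_content):
--     """Check for consistent spacing patterns."""
--     lines = text_content.split('\n')
--
--     # Positions and contents of the non-blank lines.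
--     nonblank = [(i, l) for i, l in enumerate(lines) if l.strip()]
--
--     # Distinct positive indentation widths among the non-blank lines.
--     indents = {len(l) - len(l.lstrip()) for _, l in nonblank} - {0}
--
--     # Longest blank run = largest gap between consecutive non-blank positions
--     # (sentinels -1 and len(lines)); no run scanning at all.
--     bounds = [-1] + [i for i, _ in nonblank] + [len(lines)]
--     longest = max(b - a - 1 for a, b in zip(bounds, bounds[1:]))
--
--     suggestions = []
--     if len(indents) > 4:
--         suggestions.append("Inconsistent indentation patterns. Consider using consistent spacing (e.g., 2 or 4 spaces).")
--     if longest > 2: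
--         suggestions.append(f"Excessive blank lines: Found {longest} consecutive blank lines. Consider using single blank lines for separation.")
--     return suggestions
-- ===== Notes on version B (the rewrite author's own statement) =====
-- stated objective: alternative
-- what changed: Instead of scanning lines with a running blank counter, B records the positions of the non-blank lines once and computes the longest blank run as the largest gap between consecutive non-blank positions (with sentinels -1 and len(lines)); the indentation widths come from a set comprehension over those recorded non-blank lines instead of a conditional-add loop.
import Mathlib
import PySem

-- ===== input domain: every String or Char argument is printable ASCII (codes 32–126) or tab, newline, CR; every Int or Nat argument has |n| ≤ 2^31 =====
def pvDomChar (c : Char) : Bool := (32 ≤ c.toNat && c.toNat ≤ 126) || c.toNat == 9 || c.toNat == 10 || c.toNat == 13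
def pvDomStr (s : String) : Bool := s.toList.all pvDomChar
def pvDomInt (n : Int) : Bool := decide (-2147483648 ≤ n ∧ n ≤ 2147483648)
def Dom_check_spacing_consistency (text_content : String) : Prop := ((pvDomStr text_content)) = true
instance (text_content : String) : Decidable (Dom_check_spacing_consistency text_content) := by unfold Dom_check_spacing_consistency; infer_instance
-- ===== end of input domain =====

-- B replaces A's running blank-line counter by recording the non-blank line positions once and taking
-- the largest gap between consecutive positions (with sentinels), and collects the indentation widths
-- by a set comprehension over those recorded lines (objective: alternative algorithm, same cost).

-- ===== PORT A =====
def check_spacing_consistency (text_content : String) : List String :=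
  let lines := (PySem.Str.split? text_content "\n").getD []   -- sep "\n" ≠ "" so split? is always some
  let indentation_patterns : PySem.Set Int :=
    lines.foldl (fun s line =>
      if PySem.Str.strip line != "" then
        let leading_spaces := PySem.Str.len line - PySem.Str.len (PySem.Str.lstrip line)
        if leading_spaces > 0 then PySem.Set.add s leading_spaces else s
      else s) PySem.Set.empty
  let suggestions : List String :=
    if PySem.Set.len indentation_patterns > 4 then
      ["Inconsistent indentation patterns. Consider using consistent spacing (e.g., 2 or 4 spaces)."]
    else []
  let st :=
    lines.foldl (fun (p : Int × Int) line =>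
      if PySem.Str.strip line == "" then (p.1 + 1, max p.2 (p.1 + 1)) else (0, p.2)) ((0 : Int), (0 : Int))
  if st.2 > 2 then
    suggestions ++ ["Excessive blank lines: Found " ++ PySem.Int.toStr st.2 ++ " consecutive blank lines. Consider using single blank lines for separation."]
  else suggestions

-- ===== PORT B =====
def check_spacing_consistency_alt (text_content : String) : List String :=
  let lines := (PySem.Str.split? text_content "\n").getD []
  let nonblank := (PySem.List.enumerate lines 0).filter (fun p => PySem.Str.strip p.2 != "")
  let indents : PySem.Set Int :=
    PySem.Set.diff
      (PySem.Set.ofList (nonblank.map (fun p => PySem.Str.len p.2 - PySem.Str.len (PySem.Str.lstrip p.2))))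
      [(0 : Int)]
  let bounds := [(-1 : Int)] ++ nonblank.map (fun p => p.1) ++ [(lines.length : Int)]
  let gaps := (bounds.zip bounds.tail).map (fun p => p.2 - p.1 - 1)
  -- bounds always has ≥ 2 elements, so gaps ≠ [] and Python's max never raises; .getD 0 is unreachable
  let longest := (PySem.List.max? gaps (fun x => x)).getD 0
  let suggestions : List String :=
    if PySem.Set.len indents > 4 then
      ["Inconsistent indentation patterns. Consider using consistent spacing (e.g., 2 or 4 spaces)."]
    else []
  if longest > 2 then
    suggestions ++ ["Excessive blank lines: Found " ++ PySem.Int.toStr longest ++ " consecutive blank lines. Consider using single blank lines for separation."]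
  else suggestions

-- ===== PRECONDITION & SPEC =====
def Spec_check_spacing_consistency (text_content : String) (out : List String) : Prop := out = check_spacing_consistency_alt text_content
instance (text_content : String) (out : List String) : Decidable (Spec_check_spacing_consistency text_content out) := by unfold Spec_check_spacing_consistency; infer_instance

-- ===== CLAIM =====
def Claim_equal_check_spacing_consistency : Prop := ∀ (text_content : String), Dom_check_spacing_consistency text_content → Spec_check_spacing_consistency text_content (check_spacing_consistency text_content)

-- ===== LEMMAS AND PROOFS =====

def pvBlank (l : String) : Bool := PySem.Str.strip l == ""
def pvDent (l : String) : Int := PySem.Str.len l - PySem.Str.len (PySem.Str.lstrip l)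

-- (leading blank run, max blank run) of a list of lines, structurally
def pvRunSpec : List String → Int × Int
  | [] => (0, 0)
  | l :: rest =>
    let p := pvRunSpec rest
    if pvBlank l then (p.1 + 1, max p.2 (p.1 + 1)) else (0, p.2)

theorem pvRunSpec_bounds (ls : List String) : 0 ≤ (pvRunSpec ls).1 ∧ (pvRunSpec ls).1 ≤ (pvRunSpec ls).2 := by
  induction ls with
  | nil => simp [pvRunSpec]
  | cons l rest ih =>
    simp only [pvRunSpec]
    split <;> simp <;> omega

theorem pvFoldA (ls : List String) : ∀ (c m : Int), 0 ≤ c → c ≤ m →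
    (ls.foldl (fun (p : Int × Int) line =>
      if PySem.Str.strip line == "" then (p.1 + 1, max p.2 (p.1 + 1)) else (0, p.2)) (c, m)).2
    = max m (max (c + (pvRunSpec ls).1) (pvRunSpec ls).2) := by
  induction ls with
  | nil => intro c m h0 h1; simp [pvRunSpec]; omega
  | cons l rest ih =>
    intro c m h0 h1
    have hb := pvRunSpec_bounds rest
    simp only [List.foldl_cons, pvRunSpec]
    by_cases h : pvBlank l
    · rw [if_pos (by simpa [pvBlank] using h), if_pos h]
      rw [ih (c + 1) (max m (c + 1)) (by omega) (by omega)]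
      simp only []
      omega
    · rw [if_neg (by simpa [pvBlank] using h), if_neg h]
      rw [ih 0 m (by omega) (by omega)]
      simp only []
      omega

-- B's non-blank index list, with a generalized start for induction
def pvNbIdx (ls : List String) (s : Int) : List Int :=
  ((PySem.List.enumerate ls s).filter (fun p => PySem.Str.strip p.2 != "")).map (fun p => p.1)

theorem pvNbIdx_cons (l : String) (rest : List String) (s : Int) :
    pvNbIdx (l :: rest) s =
      if pvBlank l then pvNbIdx rest (s + 1) else s :: pvNbIdx rest (s + 1) := by
  simp only [pvNbIdx, PySem.List.enumerate_cons, List.filter_cons]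
  by_cases h : pvBlank l
  · rw [if_pos h]
    simp [pvBlank] at h
    simp [h]
  · rw [if_neg h]
    simp [pvBlank] at h
    simp [h]

theorem pvNbIdx_ge (ls : List String) : ∀ (s y : Int), y ∈ pvNbIdx ls s → s ≤ y := by
  induction ls with
  | nil => intro s y h; simp [pvNbIdx] at h
  | cons l rest ih =>
    intro s y h
    rw [pvNbIdx_cons] at h
    by_cases hb : pvBlank l
    · rw [if_pos hb] at h; have := ih (s + 1) y h; omega
    · rw [if_neg hb] at h
      rcases List.mem_cons.1 h with rfl | h'
      · omega
      · have := ih (s + 1) y h'; omega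

-- running max of successive gaps, prev-carrying
def pvGapFold : Int → List Int → Int → Int
  | _, [], m => m
  | prev, x :: rest, m => pvGapFold x rest (max m (x - prev - 1))

theorem pvZipGap (t : List Int) : ∀ (prev m : Int),
    ((((prev :: t).zip t).map (fun p => p.2 - p.1 - 1)).foldl max m) = pvGapFold prev t m := by
  induction t with
  | nil => intro prev m; simp [pvGapFold]
  | cons x rest ih =>
    intro prev m
    simp only [List.zip_cons_cons, List.map_cons, List.foldl_cons, pvGapFold]
    exact ih x (max m (x - prev - 1))

theorem pvGapFold_spec (ls : List String) : ∀ (i prev m : Int), prev + 1 ≤ i →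
    pvGapFold prev (pvNbIdx ls i ++ [i + (ls.length : Int)]) m
    = max m (max ((i - prev - 1) + (pvRunSpec ls).1) (pvRunSpec ls).2) := by
  induction ls with
  | nil =>
    intro i prev m h
    simp [pvNbIdx, pvGapFold, pvRunSpec]
    omega
  | cons l rest ih =>
    intro i prev m h
    have hb := pvRunSpec_bounds rest
    rw [pvNbIdx_cons]
    by_cases hbl : pvBlank l
    · rw [if_pos hbl]
      have : i + ((l :: rest).length : Int) = (i + 1) + (rest.length : Int) := by
        simp; omega
      rw [this, ih (i + 1) prev m (by omega)]
      simp only [pvRunSpec, if_pos hbl]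
      omega
    · rw [if_neg hbl]
      simp only [List.cons_append, pvGapFold]
      have : i + ((l :: rest).length : Int) = (i + 1) + (rest.length : Int) := by
        simp; omega
      rw [this, ih (i + 1) i (max m (i - prev - 1)) (by omega)]
      simp only [pvRunSpec, if_neg hbl]
      omega

-- B's longest-gap computation equals the max blank run
theorem pvLongestEq (ls : List String) :
    (PySem.List.max?
      ((([(-1 : Int)] ++ pvNbIdx ls 0 ++ [(ls.length : Int)]).zip
        ([(-1 : Int)] ++ pvNbIdx ls 0 ++ [(ls.length : Int)]).tail).map
        (fun p => p.2 - p.1 - 1))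
      (fun x => x)).getD 0
    = (pvRunSpec ls).2 := by
  have hb := pvRunSpec_bounds ls
  rcases ht : pvNbIdx ls 0 ++ [(ls.length : Int)] with _ | ⟨x, rest⟩
  · exact absurd ht (by simp)
  · have hx : (0 : Int) ≤ x := by
      have hmem : x ∈ pvNbIdx ls 0 ++ [(ls.length : Int)] := by rw [ht]; simp
      rcases List.mem_append.1 hmem with h1 | h2
      · exact pvNbIdx_ge ls 0 x h1
      · simp at h2; omega
    have hzip : ([(-1 : Int)] ++ (x :: rest)).zip (([(-1 : Int)] ++ (x :: rest)).tail)
        = ((-1 : Int), x) :: (x :: rest).zip rest := by simp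
    rw [show ([(-1 : Int)] ++ pvNbIdx ls 0 ++ [(ls.length : Int)])
          = [(-1 : Int)] ++ (x :: rest) from by rw [List.append_assoc, ht], hzip]
    simp only [List.map_cons]
    rw [PySem.List.max?_id_cons, Option.getD_some, pvZipGap]
    have h2 : pvGapFold (-1) (x :: rest) 0 = pvGapFold x rest (x - (-1) - 1) := by
      simp only [pvGapFold]
      congr 1
      omega
    have h3 := pvGapFold_spec ls 0 (-1) 0 (by omega)
    simp only [zero_add] at h3
    rw [ht] at h3
    rw [← h2, h3]
    omega

-- membership and nodup of A's indent-set loop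
theorem pvMemFoldA (ls : List String) : ∀ (s : PySem.Set Int) (y : Int),
    (y ∈ ls.foldl (fun s line =>
      if PySem.Str.strip line != "" then
        (if PySem.Str.len line - PySem.Str.len (PySem.Str.lstrip line) > 0 then
          PySem.Set.add s (PySem.Str.len line - PySem.Str.len (PySem.Str.lstrip line)) else s)
      else s) s)
    ↔ y ∈ s ∨ ∃ l ∈ ls, (PySem.Str.strip l != "") = true ∧ 0 < pvDent l ∧ y = pvDent l := by
  induction ls with
  | nil => simp
  | cons l rest ih =>
    intro s y
    simp only [List.foldl_cons, List.mem_cons]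
    rw [ih]
    by_cases h : (PySem.Str.strip l != "") = true
    · rw [if_pos h]
      by_cases hd : PySem.Str.len l - PySem.Str.len (PySem.Str.lstrip l) > 0
      · rw [if_pos hd]
        rw [show ∀ z, z ∈ PySem.Set.add s (PySem.Str.len l - PySem.Str.len (PySem.Str.lstrip l)) ↔
              z ∈ s ∨ z = pvDent l from fun z => PySem.Set.mem_add s _ z]
        constructor
        · rintro (⟨hs | hy⟩ | ⟨w, hw, h1, h2, h3⟩)
          · exact Or.inl hs
          · exact Or.inr ⟨l, Or.inl rfl, h, by simpa [pvDent] using hd, hy⟩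
          · exact Or.inr ⟨w, Or.inr hw, h1, h2, h3⟩
        · rintro (hs | ⟨w, (rfl | hw), h1, h2, h3⟩)
          · exact Or.inl (Or.inl hs)
          · exact Or.inl (Or.inr h3)
          · exact Or.inr ⟨w, hw, h1, h2, h3⟩
      · rw [if_neg hd]
        constructor
        · rintro (hs | ⟨w, hw, h1, h2, h3⟩)
          · exact Or.inl hs
          · exact Or.inr ⟨w, Or.inr hw, h1, h2, h3⟩
        · rintro (hs | ⟨w, (rfl | hw), h1, h2, h3⟩)
          · exact Or.inl hs
          · exact absurd h2 (by simpa [pvDent] using hd)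
          · exact Or.inr ⟨w, hw, h1, h2, h3⟩
    · rw [if_neg h]
      constructor
      · rintro (hs | ⟨w, hw, h1, h2, h3⟩)
        · exact Or.inl hs
        · exact Or.inr ⟨w, Or.inr hw, h1, h2, h3⟩
      · rintro (hs | ⟨w, (rfl | hw), h1, h2, h3⟩)
        · exact Or.inl hs
        · exact absurd h1 h
        · exact Or.inr ⟨w, hw, h1, h2, h3⟩

theorem pvNodupFoldA (ls : List String) : ∀ (s : PySem.Set Int), s.Nodup →
    (ls.foldl (fun s line =>
      if PySem.Str.strip line != "" then
        (if PySem.Str.len line - PySem.Str.len (PySem.Str.lstrip line) > 0 then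
          PySem.Set.add s (PySem.Str.len line - PySem.Str.len (PySem.Str.lstrip line)) else s)
      else s) s).Nodup := by
  induction ls with
  | nil => intro s h; simpa
  | cons l rest ih =>
    intro s h
    simp only [List.foldl_cons]
    split
    · split
      · exact ih _ (PySem.Set.nodup_add s _ h)
      · exact ih _ h
    · exact ih _ h

theorem pvDent_nonneg (l : String) : 0 ≤ pvDent l := by
  have h : (PySem.Str.lstrip l).toList.length ≤ l.toList.length := by
    rw [PySem.Str.toList_lstrip]
    exact List.length_dropWhile_le _ _
  simp only [pvDent, PySem.Str.len_eq]
  omega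

-- B's enumerate-filter-map collapses onto the plain filter-map of the lines
theorem pvEnumBridge (ls : List String) : ∀ (s : Int),
    (((PySem.List.enumerate ls s).filter (fun p => PySem.Str.strip p.2 != "")).map
      (fun p => PySem.Str.len p.2 - PySem.Str.len (PySem.Str.lstrip p.2)))
    = ((ls.filter (fun l => PySem.Str.strip l != "")).map
      (fun l => PySem.Str.len l - PySem.Str.len (PySem.Str.lstrip l))) := by
  induction ls with
  | nil => intro s; simp
  | cons l rest ih =>
    intro s
    simp only [PySem.List.enumerate_cons, List.filter_cons]
    by_cases h : (PySem.Str.strip l != "") = true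
    · simp only [h, if_pos, List.map_cons, ih (s + 1)]
    · simp only [h, Bool.false_eq_true, if_false]
      exact ih (s + 1)

-- the two indent sets have the same length
theorem pvIndentLenEq (ls : List String) :
    PySem.Set.len (ls.foldl (fun s line =>
      if PySem.Str.strip line != "" then
        (if PySem.Str.len line - PySem.Str.len (PySem.Str.lstrip line) > 0 then
          PySem.Set.add s (PySem.Str.len line - PySem.Str.len (PySem.Str.lstrip line)) else s)
      else s) PySem.Set.empty)
    = PySem.Set.len (PySem.Set.diff
      (PySem.Set.ofList (((PySem.List.enumerate ls 0).filter (fun p => PySem.Str.strip p.2 != "")).map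
        (fun p => PySem.Str.len p.2 - PySem.Str.len (PySem.Str.lstrip p.2))))
      [(0 : Int)]) := by
  rw [pvEnumBridge ls 0]
  have hA := pvNodupFoldA ls PySem.Set.empty (by simp [PySem.Set.empty])
  have hB : (PySem.Set.diff
      (PySem.Set.ofList ((ls.filter (fun l => PySem.Str.strip l != "")).map
        (fun l => PySem.Str.len l - PySem.Str.len (PySem.Str.lstrip l)))) [(0 : Int)]).Nodup :=
    PySem.Set.nodup_diff _ _ (PySem.Set.nodup_ofList _)
  have hmem : ∀ y, y ∈ (ls.foldl (fun s line =>
      if PySem.Str.strip line != "" then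
        (if PySem.Str.len line - PySem.Str.len (PySem.Str.lstrip line) > 0 then
          PySem.Set.add s (PySem.Str.len line - PySem.Str.len (PySem.Str.lstrip line)) else s)
      else s) PySem.Set.empty)
      ↔ y ∈ PySem.Set.diff
        (PySem.Set.ofList ((ls.filter (fun l => PySem.Str.strip l != "")).map
          (fun l => PySem.Str.len l - PySem.Str.len (PySem.Str.lstrip l)))) [(0 : Int)] := by
    intro y
    rw [pvMemFoldA]
    rw [PySem.Set.mem_diff]
    rw [PySem.Set.mem_ofList]
    simp only [List.mem_map, List.mem_filter, List.mem_singleton, PySem.Set.empty,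
      List.not_mem_nil, false_or]
    constructor
    · rintro ⟨l, hl, h1, h2, rfl⟩
      exact ⟨⟨l, ⟨hl, h1⟩, rfl⟩, by simp only [pvDent] at h2 ⊢; omega⟩
    · rintro ⟨⟨l, ⟨hl, h1⟩, rfl⟩, hz⟩
      have := pvDent_nonneg l
      exact ⟨l, hl, h1, by simp only [pvDent] at this hz ⊢; omega, rfl⟩
  have hperm : (ls.foldl (fun s line =>
      if PySem.Str.strip line != "" then
        (if PySem.Str.len line - PySem.Str.len (PySem.Str.lstrip line) > 0 then
          PySem.Set.add s (PySem.Str.len line - PySem.Str.len (PySem.Str.lstrip line)) else s)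
      else s) PySem.Set.empty).Perm _ := (List.perm_ext_iff_of_nodup hA hB).2 hmem
  simp only [PySem.Set.len, hperm.length_eq]

-- the two blank-run maxima agree
theorem pvBlankEq (ls : List String) :
    (ls.foldl (fun (p : Int × Int) line =>
      if PySem.Str.strip line == "" then (p.1 + 1, max p.2 (p.1 + 1)) else (0, p.2)) ((0 : Int), (0 : Int))).2
    = (PySem.List.max?
        (((([(-1 : Int)] ++ ((PySem.List.enumerate ls 0).filter
              (fun p => PySem.Str.strip p.2 != "")).map (fun p => p.1) ++ [(ls.length : Int)]).zip
            (([(-1 : Int)] ++ ((PySem.List.enumerate ls 0).filter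
              (fun p => PySem.Str.strip p.2 != "")).map (fun p => p.1) ++ [(ls.length : Int)]).tail)).map
          (fun p => p.2 - p.1 - 1))) (fun x => x)).getD 0 := by
  have h1 := pvFoldA ls 0 0 (by omega) (by omega)
  have hb := pvRunSpec_bounds ls
  have e : ((PySem.List.enumerate ls 0).filter (fun p => PySem.Str.strip p.2 != "")).map
      (fun p => p.1) = pvNbIdx ls 0 := rfl
  rw [h1, e, pvLongestEq ls]
  omega

-- ===== VERDICT =====
theorem check_spacing_consistency_spec : Claim_equal_check_spacing_consistency := by
  intro t _
  unfold Spec_check_spacing_consistency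
  unfold check_spacing_consistency check_spacing_consistency_alt
  simp only []
  rw [pvIndentLenEq, pvBlankEq]
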